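-- pv_equiv track=rewrite | github.com/nahcikeel/Algorithm | 프로그래머스/2/87946. 피로도/피로도.py | solution
-- ===== SOURCE A (Python) =====
-- from itertools import permutations
--
-- def solution(k, dungeons):
--     answer = []
--
--     dungeons = list(permutations(dungeons, len(dungeons)))
--
--     for dungeon in dungeons:
--         cnt = 0
--         full_hp = k
--         for info in dungeon:
--             hp = info[0]
--             cost = info[1]
--
--             if full_hp>=hp:
--                 full_hp-=cost
--                 cnt += 1
--
--         answer.append(cnt)
--
--     return max(answer)
-- ===== SOURCE B (Python) =====
-- def solution(k, dungeons):
--     # Recursive backtracking: branch only on dungeons that are currently enterable,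
--     # instead of enumerating and simulating every permutation.
--     def best(fatigue, rem):
--         acc = 0
--         for d in rem:
--             if fatigue >= d[0]:
--                 nxt = list(rem)
--                 nxt.remove(d)
--                 acc = max(acc, 1 + best(fatigue - d[1], nxt))
--         return acc
--     return best(k, dungeons)
-- ===== Notes on version B (the rewrite author's own statement) =====
-- stated objective: faster
-- what changed: Replaces exhaustive enumeration and simulation of all n! permutations with a recursive backtracking search that branches only on currently enterable dungeons, pruning infeasible orders.
import Mathlib
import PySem

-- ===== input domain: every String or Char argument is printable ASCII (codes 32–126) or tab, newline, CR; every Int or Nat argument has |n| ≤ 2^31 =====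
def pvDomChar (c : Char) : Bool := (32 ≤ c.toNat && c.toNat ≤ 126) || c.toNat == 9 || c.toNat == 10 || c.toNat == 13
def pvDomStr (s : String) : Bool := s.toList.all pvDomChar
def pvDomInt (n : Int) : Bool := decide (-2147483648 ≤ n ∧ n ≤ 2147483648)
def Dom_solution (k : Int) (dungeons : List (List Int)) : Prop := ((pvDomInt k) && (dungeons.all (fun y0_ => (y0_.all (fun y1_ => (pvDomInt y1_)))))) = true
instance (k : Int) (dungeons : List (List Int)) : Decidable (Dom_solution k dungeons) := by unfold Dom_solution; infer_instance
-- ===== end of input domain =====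

-- B replaces A's enumeration of all n! permutations by a recursive backtracking
-- search that branches only on currently enterable dungeons (faster in practice).

-- ===== PORT A =====
def solution (k : Int) (dungeons : List (List Int)) : Int :=
  let perms := PySem.List.permutations dungeons dungeons.length
  let answer := perms.map (fun dungeon =>
    (dungeon.foldl (fun (s : Int × Int) info =>
       let hp := PySem.List.pyGetD info 0 0
       let cost := PySem.List.pyGetD info 1 0
       if s.2 ≥ hp then (s.1 + 1, s.2 - cost) else s) ((0 : Int), k)).1)
  (PySem.List.max? answer (fun x => x)).getD 0

-- ===== PORT B =====
-- helper `best` of Source B: branch on every currently enterable dungeon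
def pvBest (k : Int) (rem : List (List Int)) : Int :=
  rem.attach.foldl (fun acc d =>
    if k ≥ PySem.List.pyGetD d.1 0 0 then
      max acc (1 + pvBest (k - PySem.List.pyGetD d.1 1 0) (rem.erase d.1))
    else acc) 0
termination_by rem.length
decreasing_by
  have h := List.length_erase_of_mem d.2
  have : 0 < rem.length := List.length_pos_of_mem d.2
  omega

def solution_alt (k : Int) (dungeons : List (List Int)) : Int :=
  pvBest k dungeons

-- ===== PRECONDITION & SPEC =====
-- Pre_ excludes dungeons entries with fewer than two numbers: there Python's
-- info[0]/info[1] (and B's d[0]/d[1]) raise IndexError.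
def Pre_solution (k : Int) (dungeons : List (List Int)) : Prop :=
  ∀ d ∈ dungeons, 2 ≤ d.length
instance (k : Int) (dungeons : List (List Int)) : Decidable (Pre_solution k dungeons) := by unfold Pre_solution; infer_instance

def pvWitness_solution : Int × List (List Int) := (80, [[80, 20], [50, 40], [30, 10]])

def Spec_solution (k : Int) (dungeons : List (List Int)) (out : Int) : Prop := out = solution_alt k dungeons
instance (k : Int) (dungeons : List (List Int)) (out : Int) : Decidable (Spec_solution k dungeons out) := by unfold Spec_solution; infer_instance

-- ===== CLAIM (what is proved, stated in full; the proofs are below) =====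
def Claim_equal_solution : Prop := ∀ (k : Int) (dungeons : List (List Int)), Dom_solution k dungeons → Pre_solution k dungeons → Spec_solution k dungeons (solution k dungeons)

-- ===== LEMMAS AND PROOFS =====

-- mathematical form of A's inner loop: greedy count along a fixed order
def pvG : Int → List (List Int) → Int
  | _, [] => 0
  | k, d :: t =>
    if k ≥ PySem.List.pyGetD d 0 0 then 1 + pvG (k - PySem.List.pyGetD d 1 0) t
    else pvG k t

theorem pvG_nonneg (k : Int) (p : List (List Int)) : 0 ≤ pvG k p := by
  induction p generalizing k with
  | nil => simp [pvG]
  | cons d t ih =>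
    simp only [pvG]
    split
    · have := ih (k - PySem.List.pyGetD d 1 0); omega
    · exact ih k

theorem pvFoldA (p : List (List Int)) (k c : Int) :
    (p.foldl (fun (s : Int × Int) info =>
       let hp := PySem.List.pyGetD info 0 0
       let cost := PySem.List.pyGetD info 1 0
       if s.2 ≥ hp then (s.1 + 1, s.2 - cost) else s) (c, k)).1 = c + pvG k p := by
  induction p generalizing k c with
  | nil => simp [pvG]
  | cons d t ih =>
    simp only [List.foldl_cons, pvG]
    split
    · rw [ih]; ring
    · rw [ih]

-- generic lemmas about the running-max-under-a-guard fold shape used by pvBest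
theorem pvFoldMax_init_le {α : Type} (q : α → Prop) [DecidablePred q] (v : α → Int)
    (l : List α) (a : Int) :
    a ≤ l.foldl (fun acc x => if q x then max acc (v x) else acc) a := by
  induction l generalizing a with
  | nil => simp
  | cons x t ih =>
    simp only [List.foldl_cons]
    split
    · exact le_trans (le_max_left _ _) (ih _)
    · exact ih _

theorem pvFoldMax_le_of_mem {α : Type} (q : α → Prop) [DecidablePred q] (v : α → Int)
    (l : List α) (a : Int) (x : α) (hx : x ∈ l) (hq : q x) :
    v x ≤ l.foldl (fun acc y => if q y then max acc (v y) else acc) a := by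
  induction l generalizing a with
  | nil => cases hx
  | cons y t ih =>
    simp only [List.foldl_cons]
    rcases List.mem_cons.mp hx with h | h
    · subst h
      simp only [if_pos hq]
      exact le_trans (le_max_right _ _) (pvFoldMax_init_le q v t _)
    · exact ih _ h

theorem pvFoldMax_cases {α : Type} (q : α → Prop) [DecidablePred q] (v : α → Int)
    (l : List α) (a : Int) :
    l.foldl (fun acc x => if q x then max acc (v x) else acc) a = a ∨
      ∃ x ∈ l, q x ∧ l.foldl (fun acc x => if q x then max acc (v x) else acc) a = v x := by
  induction l generalizing a with
  | nil => left; rfl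
  | cons y t ih =>
    simp only [List.foldl_cons]
    split
    · rcases ih (max a (v y)) with h | ⟨x, hx, hq, hv⟩
      · rcases max_choice a (v y) with hm | hm
        · left; rw [h, hm]
        · right; exact ⟨y, List.mem_cons_self, by assumption, by rw [h, hm]⟩
      · right; exact ⟨x, List.mem_cons_of_mem _ hx, hq, hv⟩
    · rcases ih a with h | ⟨x, hx, hq, hv⟩
      · left; exact h
      · right; exact ⟨x, List.mem_cons_of_mem _ hx, hq, hv⟩

theorem pvFoldMax_le {α : Type} (q : α → Prop) [DecidablePred q] (v : α → Int)
    (l : List α) (a B : Int) (ha : a ≤ B) (hv : ∀ x ∈ l, q x → v x ≤ B) :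
    l.foldl (fun acc x => if q x then max acc (v x) else acc) a ≤ B := by
  rcases pvFoldMax_cases q v l a with h | ⟨x, hx, hq, hv'⟩
  · rw [h]; exact ha
  · rw [hv']; exact hv x hx hq

-- facts about pvBest derived from the fold lemmas
theorem pvBest_nonneg (k : Int) (l : List (List Int)) : 0 ≤ pvBest k l := by
  rw [pvBest]
  exact pvFoldMax_init_le _ _ _ _

theorem pvBest_branch_le (k : Int) (l : List (List Int)) (d : List Int)
    (hd : d ∈ l) (hk : k ≥ PySem.List.pyGetD d 0 0) :
    1 + pvBest (k - PySem.List.pyGetD d 1 0) (l.erase d) ≤ pvBest k l := by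
  conv_rhs => rw [pvBest]
  exact pvFoldMax_le_of_mem
    (fun x : {x // x ∈ l} => k ≥ PySem.List.pyGetD x.1 0 0)
    (fun x : {x // x ∈ l} => 1 + pvBest (k - PySem.List.pyGetD x.1 1 0) (l.erase x.1))
    l.attach 0 ⟨d, hd⟩ (List.mem_attach _ _) hk

theorem pvBest_cases (k : Int) (l : List (List Int)) :
    pvBest k l = 0 ∨ ∃ d ∈ l, k ≥ PySem.List.pyGetD d 0 0 ∧
      pvBest k l = 1 + pvBest (k - PySem.List.pyGetD d 1 0) (l.erase d) := by
  rw [pvBest]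
  rcases pvFoldMax_cases
    (fun x : {x // x ∈ l} => k ≥ PySem.List.pyGetD x.1 0 0)
    (fun x : {x // x ∈ l} => 1 + pvBest (k - PySem.List.pyGetD x.1 1 0) (l.erase x.1))
    l.attach 0 with h | ⟨x, _, hq, hv⟩
  · left; exact h
  · right; exact ⟨x.1, x.2, hq, hv⟩

-- erasing an element can only lower the best count
theorem pvBest_erase_le (n : Nat) : ∀ (l : List (List Int)), l.length ≤ n →
    ∀ d ∈ l, ∀ k, pvBest k (l.erase d) ≤ pvBest k l := by
  induction n with
  | zero => intro l hl d hd; exact absurd (List.length_pos_of_mem hd) (by omega)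
  | succ n ih =>
    intro l hl d hd k
    conv_lhs => rw [pvBest]
    refine pvFoldMax_le _ _ _ _ _ (pvBest_nonneg _ _) ?_
    rintro ⟨e, he⟩ - hq
    have heL : e ∈ l := List.mem_of_mem_erase he
    have hcomm : (l.erase d).erase e = (l.erase e).erase d := List.erase_comm d e
    have hstep : pvBest (k - PySem.List.pyGetD e 1 0) ((l.erase d).erase e)
        ≤ pvBest (k - PySem.List.pyGetD e 1 0) (l.erase e) := by
      rw [hcomm]
      by_cases hmem : d ∈ l.erase e
      · have hlen : (l.erase e).length ≤ n := by
          have := List.length_erase_of_mem heL; omega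
        exact ih (l.erase e) hlen d hmem _
      · rw [List.erase_of_not_mem hmem]
    calc 1 + pvBest (k - PySem.List.pyGetD e 1 0) ((l.erase d).erase e)
        ≤ 1 + pvBest (k - PySem.List.pyGetD e 1 0) (l.erase e) := by omega
      _ ≤ pvBest k l := pvBest_branch_le k l e heL hq

-- any fixed order achieves at most the backtracking optimum
theorem pvG_le_pvBest (p : List (List Int)) : ∀ (l : List (List Int)), p.Perm l →
    ∀ k, pvG k p ≤ pvBest k l := by
  induction p with
  | nil => intro l hp k; rw [(hp.symm.eq_nil : l = [])]; exact pvBest_nonneg _ _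
  | cons d t ih =>
    intro l hp k
    have hd : d ∈ l := hp.mem_iff.mp List.mem_cons_self
    have ht : t.Perm (l.erase d) :=
      ((hp.trans (List.perm_cons_erase hd)).cons_inv)
    simp only [pvG]
    split
    · calc 1 + pvG (k - PySem.List.pyGetD d 1 0) t
          ≤ 1 + pvBest (k - PySem.List.pyGetD d 1 0) (l.erase d) := by
            have := ih (l.erase d) ht (k - PySem.List.pyGetD d 1 0); omega
        _ ≤ pvBest k l := pvBest_branch_le k l d hd (by assumption)
    · exact le_trans (ih (l.erase d) ht k)
        (pvBest_erase_le l.length l le_rfl d hd k)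

-- the backtracking optimum is achieved by some order
theorem pvBest_achieved (n : Nat) : ∀ (l : List (List Int)), l.length ≤ n → ∀ k,
    ∃ p, p.Perm l ∧ pvBest k l ≤ pvG k p := by
  induction n with
  | zero =>
    intro l hl k
    have : l = [] := List.length_eq_zero_iff.mp (by omega)
    subst this
    exact ⟨[], List.Perm.refl _, by rw [pvBest]; simp [pvG]⟩
  | succ n ih =>
    intro l hl k
    rcases pvBest_cases k l with h0 | ⟨d, hd, hq, hv⟩
    · exact ⟨l, List.Perm.refl _, by rw [h0]; exact pvG_nonneg _ _⟩
    · have hlen : (l.erase d).length ≤ n := by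
        have := List.length_erase_of_mem hd
        have := List.length_pos_of_mem hd
        omega
      obtain ⟨p', hp', hle⟩ := ih (l.erase d) hlen (k - PySem.List.pyGetD d 1 0)
      refine ⟨d :: p', ?_, ?_⟩
      · exact (hp'.cons d).trans (List.perm_cons_erase hd).symm
      · simp only [pvG, if_pos hq]
        omega

theorem pvEraseIdx_idxOf (a : List Int) (xs : List (List Int)) :
    xs.eraseIdx (xs.idxOf a) = xs.erase a := by
  induction xs with
  | nil => rfl
  | cons b t ih =>
    by_cases h : b = a
    · subst h
      simp [List.idxOf_cons_self, List.erase_cons_head]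
    · rw [List.erase_cons_tail (by simp [h]), List.idxOf_cons_ne _ h,
        List.eraseIdx_cons_succ, ih]

-- completeness of PySem's itertools.permutations: every permutation is listed
theorem pvMem_permutations : ∀ (p xs : List (List Int)), p.Perm xs →
    p ∈ PySem.List.permutations xs p.length := by
  intro p
  induction p with
  | nil =>
    intro xs hp
    rw [(hp.symm.eq_nil : xs = [])]
    decide
  | cons a t ih =>
    intro xs hp
    have ha : a ∈ xs := hp.mem_iff.mp List.mem_cons_self
    have ht : t.Perm (xs.erase a) := (hp.trans (List.perm_cons_erase ha)).cons_inv
    have hi : xs.idxOf a < xs.length := List.idxOf_lt_length_of_mem ha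
    have hget : xs[xs.idxOf a]? = some a := by
      rw [List.getElem?_eq_getElem hi]
      simp [List.getElem_idxOf]
    have herase : xs.eraseIdx (xs.idxOf a) = xs.erase a := pvEraseIdx_idxOf a xs
    show a :: t ∈ PySem.List.permutations xs (t.length + 1)
    rw [PySem.List.permutations]
    refine List.mem_flatMap.mpr ⟨xs.idxOf a, List.mem_range.mpr hi, ?_⟩
    rw [hget]
    simp only [herase]
    exact List.mem_map.mpr ⟨t, ih (xs.erase a) ht, rfl⟩

theorem pvMem_permutations' (p xs : List (List Int)) (hp : p.Perm xs) :
    p ∈ PySem.List.permutations xs xs.length := by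
  have := pvMem_permutations p xs hp
  rwa [hp.length_eq] at this

-- ===== VERDICT (by name: the statement is the Claim_ definition above) =====
theorem solution_spec : Claim_equal_solution := by
  intro k dungeons _ _
  show solution k dungeons = solution_alt k dungeons
  unfold solution solution_alt
  simp only []
  have hself : dungeons ∈ PySem.List.permutations dungeons dungeons.length :=
    pvMem_permutations' dungeons dungeons (List.Perm.refl _)
  set perms := PySem.List.permutations dungeons dungeons.length with hperms
  set F : List (List Int) → Int := fun dungeon =>
    (dungeon.foldl (fun (s : Int × Int) info =>
       let hp := PySem.List.pyGetD info 0 0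
       let cost := PySem.List.pyGetD info 1 0
       if s.2 ≥ hp then (s.1 + 1, s.2 - cost) else s) ((0 : Int), k)).1 with hF
  have hFg : ∀ p, F p = pvG k p := by
    intro p
    have := pvFoldA p k 0
    simpa [hF] using this
  have hne : perms.map F ≠ [] := by
    intro h
    rcases List.map_eq_nil_iff.mp h with h'
    rw [h'] at hself; cases hself
  obtain ⟨m, hm⟩ : ∃ m, PySem.List.max? (perms.map F) (fun x => x) = some m := by
    cases h : PySem.List.max? (perms.map F) (fun x => x) with
    | none => exact absurd ((PySem.List.max?_eq_none_iff _ _).mp h) hne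
    | some m => exact ⟨m, rfl⟩
  rw [hm]
  simp only [Option.getD_some]
  -- m ≤ pvBest : m is one of the greedy counts, each ≤ pvBest
  have hmem := PySem.List.max?_mem hm
  obtain ⟨p0, hp0, hval⟩ := List.mem_map.mp hmem
  have hle1 : m ≤ pvBest k dungeons := by
    rw [← hval, hFg]
    exact pvG_le_pvBest p0 dungeons (PySem.List.perm_of_mem_permutations hp0) k
  -- pvBest ≤ m : pvBest is achieved by some permutation, which appears in the list
  obtain ⟨p1, hp1, hge⟩ := pvBest_achieved dungeons.length dungeons le_rfl k
  have hmemp1 : F p1 ∈ perms.map F :=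
    List.mem_map.mpr ⟨p1, pvMem_permutations' p1 dungeons hp1, rfl⟩
  have hle2 : pvBest k dungeons ≤ m := by
    have := PySem.List.max?_isMax hm (F p1) hmemp1
    rw [hFg] at this
    omega
  omega
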